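-- pv_equiv track=rewrite | github.com/TeodoraLazaroiu/FMI-Materials | Inteligenta Artificiala/Invatare Automata/Colocviu/Lazaroiu_Teodora_241_solutie_1.py | similaritate
-- ===== SOURCE A (Python) =====
-- def similaritate(s1, s2, p):
--     count = 0
--     s1 = [x for x in s1]
--     s2 = [x for x in s2]
--     for i in range(0, len(s1) - p + 1):
--         for j in range(0, len(s2) - p + 1):
--             if s1[i:i+p] == s2[j:j+p]:
--                 count = count + 1
--
--     return count
-- ===== SOURCE B (Python) =====
-- def similaritate(s1, s2, p):
--     counts = {}
--     for j in range(0, len(s2) - p + 1):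
--         g = s2[j:j+p]
--         counts[g] = counts.get(g, 0) + 1
--     total = 0
--     for i in range(0, len(s1) - p + 1):
--         total = total + counts.get(s1[i:i+p], 0)
--     return total
-- ===== Notes on version B (the rewrite author's own statement) =====
-- stated objective: faster
-- what changed: Replaces the nested all-pairs slice comparison with a one-pass hash count of s2's p-grams followed by a one-pass lookup sum over s1's p-grams.
import Mathlib
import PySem

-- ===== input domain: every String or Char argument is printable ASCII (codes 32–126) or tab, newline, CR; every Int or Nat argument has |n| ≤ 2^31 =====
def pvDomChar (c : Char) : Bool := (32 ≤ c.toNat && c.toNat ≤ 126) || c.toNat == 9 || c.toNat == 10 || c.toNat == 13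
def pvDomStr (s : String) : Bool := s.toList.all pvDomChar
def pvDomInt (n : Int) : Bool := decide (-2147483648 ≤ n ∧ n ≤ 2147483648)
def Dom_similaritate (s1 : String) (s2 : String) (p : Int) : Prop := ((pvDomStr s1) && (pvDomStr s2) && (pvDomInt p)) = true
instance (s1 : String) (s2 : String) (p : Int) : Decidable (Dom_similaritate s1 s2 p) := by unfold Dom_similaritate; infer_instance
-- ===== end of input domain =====

-- B replaces A's nested all-pairs slice comparison by a single hash count of s2's p-grams
-- plus a lookup sum over s1's p-grams (objective: faster, asymptotic).


-- ===== PORT A =====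
def similaritate (s1 : String) (s2 : String) (p : Int) : Int :=
  let l1 := s1.toList
  let l2 := s2.toList
  (PySem.List.pyRange 0 ((l1.length : Int) - p + 1) 1).foldl (fun count i =>
    (PySem.List.pyRange 0 ((l2.length : Int) - p + 1) 1).foldl (fun count j =>
      if PySem.List.slice l1 (some i) (some (i + p)) == PySem.List.slice l2 (some j) (some (j + p))
      then count + 1 else count) count) 0

-- ===== PORT B =====
def similaritate_alt (s1 : String) (s2 : String) (p : Int) : Int :=
  let l1 := s1.toList
  let l2 := s2.toList
  let counts : PySem.Dict (List Char) Int :=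
    (PySem.List.pyRange 0 ((l2.length : Int) - p + 1) 1).foldl (fun d j =>
      d.insert (PySem.List.slice l2 (some j) (some (j + p)))
        (d.getD (PySem.List.slice l2 (some j) (some (j + p))) 0 + 1)) PySem.Dict.empty
  (PySem.List.pyRange 0 ((l1.length : Int) - p + 1) 1).foldl (fun total i =>
    total + counts.getD (PySem.List.slice l1 (some i) (some (i + p))) 0) 0

-- ===== PRECONDITION & SPEC =====
def Spec_similaritate (s1 : String) (s2 : String) (p : Int) (out : Int) : Prop := out = similaritate_alt s1 s2 p
instance (s1 : String) (s2 : String) (p : Int) (out : Int) : Decidable (Spec_similaritate s1 s2 p out) := by unfold Spec_similaritate; infer_instance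

-- ===== CLAIM (what is proved, stated in full; the proofs are below) =====
def Claim_equal_similaritate : Prop := ∀ (s1 : String) (s2 : String) (p : Int), Dom_similaritate s1 s2 p → Spec_similaritate s1 s2 p (similaritate s1 s2 p)

-- ===== LEMMAS AND PROOFS =====

-- A's inner loop counts how many s2-grams equal the current s1-gram.
theorem pv_inner_count (l1 l2 : List Char) (p : Int) (i c : Int) :
    (PySem.List.pyRange 0 ((l2.length : Int) - p + 1) 1).foldl (fun count j =>
      if PySem.List.slice l1 (some i) (some (i + p)) == PySem.List.slice l2 (some j) (some (j + p))
      then count + 1 else count) c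
    = c + (((PySem.List.pyRange 0 ((l2.length : Int) - p + 1) 1).map
        (fun j => PySem.List.slice l2 (some j) (some (j + p)))).count
        (PySem.List.slice l1 (some i) (some (i + p))) : Int) := by
  rw [← List.foldl_map (f := fun j => PySem.List.slice l2 (some j) (some (j + p)))
    (g := fun count g => if PySem.List.slice l1 (some i) (some (i + p)) == g then count + 1 else count)]
  simp only [BEq.comm]
  exact PySem.List.foldl_beq_add_one _ _ _

-- B's dict lookup is the same count.
theorem pv_dict_count (l2 : List Char) (p : Int) (v : List Char) :
    (((PySem.List.pyRange 0 ((l2.length : Int) - p + 1) 1).foldl (fun d j =>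
        d.insert (PySem.List.slice l2 (some j) (some (j + p)))
          (d.getD (PySem.List.slice l2 (some j) (some (j + p))) 0 + 1))
        (PySem.Dict.empty : PySem.Dict (List Char) Int)).getD v 0)
    = (((PySem.List.pyRange 0 ((l2.length : Int) - p + 1) 1).map
        (fun j => PySem.List.slice l2 (some j) (some (j + p)))).count v : Int) := by
  rw [← List.foldl_map (f := fun j => PySem.List.slice l2 (some j) (some (j + p)))
    (g := fun d : PySem.Dict (List Char) Int => fun g => d.insert g (d.getD g 0 + 1))]
  rw [PySem.Dict.getD_foldl_insert_add_one]
  simp [PySem.Dict.getD_empty]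

-- ===== VERDICT (by name: the statement is the Claim_ definition above) =====
theorem similaritate_spec : Claim_equal_similaritate := by
  intro s1 s2 p _
  unfold Spec_similaritate similaritate similaritate_alt
  refine PySem.List.foldl_congr_mem _ _ _ _ (fun c i _ => ?_)
  rw [pv_inner_count, pv_dict_count]
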